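-- pv_equiv track=rewrite | github.com/Neo2481/lordflix-decrypt | standalone/wasm_deep_analyze.py | read_leb128
-- ===== SOURCE A (Python) =====
-- def read_leb128(data, pos):
--     """Read unsigned LEB128 value"""
--     result = 0
--     shift = 0
--     while pos < len(data):
--         byte = data[pos]; pos += 1
--         result |= (byte & 0x7f) << shift; shift += 7
--         if not (byte & 0x80):
--             break
--     return result, pos
-- ===== SOURCE B (Python) =====
-- def read_leb128(data, pos):
--     """Read unsigned LEB128 value"""
--     n = len(data)
--     # Phase 1: find `end`, the position just past the terminating byte
--     # (first byte without the 0x80 continuation bit), or n when truncated.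
--     end = pos
--     while end < n and data[end] & 0x80:
--         end += 1
--     if end < n:
--         end += 1
--     # Phase 2: combine the payload back-to-front by Horner's rule in base 128.
--     result = 0
--     i = end - 1
--     while i >= pos:
--         result = (result << 7) | (data[i] & 0x7f)
--         i -= 1
--     return result, end
-- ===== Notes on version B (the rewrite author's own statement) =====
-- stated objective: alternative
-- what changed: B decodes in two staged passes over indices: it first only scans for the end position of the encoded value (no value computed), then walks the bytes backwards from end-1 to pos combining them by Horner's rule in base 128, eliminating A's fused or-accumulate with a running shift counter.
import Mathlib
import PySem

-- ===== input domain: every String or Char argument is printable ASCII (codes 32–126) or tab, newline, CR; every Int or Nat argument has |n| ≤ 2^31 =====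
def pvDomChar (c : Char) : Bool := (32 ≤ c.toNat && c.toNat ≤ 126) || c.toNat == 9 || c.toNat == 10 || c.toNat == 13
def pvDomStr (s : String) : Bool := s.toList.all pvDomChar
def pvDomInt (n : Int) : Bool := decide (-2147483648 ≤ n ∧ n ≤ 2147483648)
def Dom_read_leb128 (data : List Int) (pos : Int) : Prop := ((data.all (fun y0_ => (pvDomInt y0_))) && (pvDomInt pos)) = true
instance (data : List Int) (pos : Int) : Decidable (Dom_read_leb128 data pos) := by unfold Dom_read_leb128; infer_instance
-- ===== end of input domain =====

-- B replaces A's single forward or-accumulate loop (running shift counter) by two staged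
-- index passes: find the end position first, then combine the bytes backwards by Horner's
-- rule in base 128.

-- ===== PORT A =====
-- the while loop; state (result, shift) carried as parameters; shift is always ≥ 0
-- (multiples of 7), so `<<< shift.toNat` is exactly Python's `<< shift` here.
def readA_loop (data : List Int) (pos result shift : Int) : Int × Int :=
  if _h : pos < (data.length : Int) then
    match PySem.List.pyGet? data pos with
    | none => (result, pos)     -- Python raises IndexError here; excluded by Pre_
    | some byte =>
      let result' := PySem.Int.bor result ((PySem.Int.band byte 127) <<< shift.toNat)
      if PySem.Int.band byte 128 = 0 then (result', pos + 1)
      else readA_loop data (pos + 1) result' (shift + 7)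
  else (result, pos)
termination_by (data.length - pos).toNat
decreasing_by omega

def read_leb128 (data : List Int) (pos : Int) : Int × Int :=
  readA_loop data pos 0 0

-- ===== PORT B =====
-- phase 1: `while end < n and data[end] & 0x80: end += 1`
def findEndB (data : List Int) (e : Int) : Int :=
  if _h : e < (data.length : Int) then
    match PySem.List.pyGet? data e with
    | none => e     -- Python raises IndexError here; excluded by Pre_
    | some b => if PySem.Int.band b 128 = 0 then e else findEndB data (e + 1)
  else e
termination_by (data.length - e).toNat
decreasing_by omega

-- phase 2: `while i >= pos: result = (result << 7) | (data[i] & 0x7f); i -= 1`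
def hornerB (data : List Int) (i lo result : Int) : Int :=
  if _h : lo ≤ i then
    match PySem.List.pyGet? data i with
    | none => result   -- Python raises IndexError here; unreachable under Pre_
    | some b => hornerB data (i - 1) lo (PySem.Int.bor (result <<< (7:Nat)) (PySem.Int.band b 127))
  else result
termination_by (i - lo + 1).toNat
decreasing_by omega

def read_leb128_alt (data : List Int) (pos : Int) : Int × Int :=
  let e0 := findEndB data pos
  let e := if e0 < (data.length : Int) then e0 + 1 else e0
  (hornerB data (e - 1) pos 0, e)

-- ===== PRECONDITION & SPEC =====
-- Pre_ excludes exactly the inputs where Python's data[pos] raises IndexError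
-- (pos below -len(data) while still < len(data)); A returns on every other input.
def Pre_read_leb128 (data : List Int) (pos : Int) : Prop :=
  -(data.length : Int) ≤ pos ∨ (data.length : Int) ≤ pos
instance (data : List Int) (pos : Int) : Decidable (Pre_read_leb128 data pos) := by
  unfold Pre_read_leb128; infer_instance

def pvWitness_read_leb128 : List Int × Int := ([133, 7, 2], 0)

def Spec_read_leb128 (data : List Int) (pos : Int) (out : Int × Int) : Prop := out = read_leb128_alt data pos
instance (data : List Int) (pos : Int) (out : Int × Int) : Decidable (Spec_read_leb128 data pos out) := by unfold Spec_read_leb128; infer_instance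

-- ===== CLAIM (what is proved, stated in full; the proofs are below) =====
def Claim_equal_read_leb128 : Prop := ∀ (data : List Int) (pos : Int), Dom_read_leb128 data pos → Pre_read_leb128 data pos → Spec_read_leb128 data pos (read_leb128 data pos)

-- ===== LEMMAS AND PROOFS =====

-- accumulator-free description of A's scan: the list of 7-bit groups and the final pos
def pvGroups (data : List Int) (pos : Int) : List Int × Int :=
  if _h : pos < (data.length : Int) then
    match PySem.List.pyGet? data pos with
    | none => ([], pos)
    | some byte =>
      if PySem.Int.band byte 128 = 0 then ([PySem.Int.band byte 127], pos + 1)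
      else
        let r := pvGroups data (pos + 1)
        (PySem.Int.band byte 127 :: r.1, r.2)
  else ([], pos)
termination_by (data.length - pos).toNat
decreasing_by omega

-- value of a group list, little-endian base 2^7
def pvVal : List Int → Int
  | [] => 0
  | c :: cs => PySem.Int.bor c (pvVal cs <<< (7:Nat))

theorem pv_band127_nonneg (a : Int) : 0 ≤ PySem.Int.band a 127 := by
  unfold PySem.Int.band
  split_ifs <;> omega

theorem pv_shl_nonneg {a : Int} (ha : 0 ≤ a) (k : Nat) : 0 ≤ a <<< k := by
  lift a to Nat using ha
  rw [← Int.natCast_shiftLeft]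
  exact Int.natCast_nonneg _

theorem pv_bor_nonneg {a b : Int} (ha : 0 ≤ a) (hb : 0 ≤ b) : 0 ≤ PySem.Int.bor a b := by
  rw [PySem.Int.bor_of_nonneg ha hb]; exact Int.natCast_nonneg _

theorem pv_bor_assoc {a b c : Int} (ha : 0 ≤ a) (hb : 0 ≤ b) (hc : 0 ≤ c) :
    PySem.Int.bor (PySem.Int.bor a b) c = PySem.Int.bor a (PySem.Int.bor b c) := by
  rw [PySem.Int.bor_of_nonneg ha hb, PySem.Int.bor_of_nonneg hb hc,
    PySem.Int.bor_of_nonneg (Int.natCast_nonneg _) hc,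
    PySem.Int.bor_of_nonneg ha (Int.natCast_nonneg _)]
  simp [Nat.or_assoc]

theorem pv_shl_bor {a b : Int} (ha : 0 ≤ a) (hb : 0 ≤ b) (k : Nat) :
    (PySem.Int.bor a b) <<< k = PySem.Int.bor (a <<< k) (b <<< k) := by
  lift a to Nat using ha
  lift b to Nat using hb
  simp [← Int.natCast_shiftLeft, Nat.shiftLeft_or_distrib]

theorem pvVal_nonneg (gs : List Int) (h : ∀ g ∈ gs, 0 ≤ g) : 0 ≤ pvVal gs := by
  induction gs with
  | nil => simp [pvVal]
  | cons c cs ih =>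
    exact pv_bor_nonneg (h c (by simp)) (pv_shl_nonneg (ih (fun g hg => h g (by simp [hg]))) 7)

theorem pvGroups_nonneg (data : List Int) (pos : Int) :
    ∀ g ∈ (pvGroups data pos).1, 0 ≤ g := by
  induction pos using pvGroups.induct data with
  | case1 pos h heq => rw [pvGroups]; simp [h, heq]
  | case2 pos h byte heq hstop =>
      rw [pvGroups]; simp only [h, heq, hstop, dif_pos, if_pos]
      intro g hg; simp at hg; simp [hg, pv_band127_nonneg]
  | case3 pos h byte heq hstop ih =>
      rw [pvGroups]; simp only [h, heq, hstop, dif_pos]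
      intro g hg
      simp at hg
      rcases hg with rfl | hg
      · exact pv_band127_nonneg _
      · exact ih g hg
  | case4 pos h => rw [pvGroups]; simp [h]

theorem pv_step {r c v : Int} (s : Int) (hr : 0 ≤ r) (hc : 0 ≤ c) (hv : 0 ≤ v)
    (hs : 0 ≤ s) :
    PySem.Int.bor (PySem.Int.bor r (c <<< s.toNat)) (v <<< (s + 7).toNat)
      = PySem.Int.bor r ((PySem.Int.bor c (v <<< (7 : Nat))) <<< s.toNat) := by
  have h7 : (s + 7).toNat = 7 + s.toNat := by omega
  rw [h7, Int.shiftLeft_add, pv_shl_bor hc (pv_shl_nonneg hv 7)]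
  exact pv_bor_assoc hr (pv_shl_nonneg hc _) (pv_shl_nonneg (pv_shl_nonneg hv _) _)

theorem readA_loop_eq (data : List Int) (pos : Int) : ∀ r s : Int, 0 ≤ r → 0 ≤ s →
    readA_loop data pos r s
      = (PySem.Int.bor r (pvVal (pvGroups data pos).1 <<< s.toNat), (pvGroups data pos).2) := by
  induction pos using pvGroups.induct data with
  | case1 pos h heq =>
      intro r s hr hs
      rw [readA_loop, pvGroups]; simp [h, heq, pvVal]
  | case2 pos h byte heq hstop =>
      intro r s hr hs
      rw [readA_loop, pvGroups]
      simp [h, heq, hstop, pvVal]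
  | case3 pos h byte heq hstop ih =>
      intro r s hr hs
      rw [readA_loop, pvGroups]
      simp only [h, heq, hstop, dif_pos, ite_false]
      rw [ih _ _ (pv_bor_nonneg hr (pv_shl_nonneg (pv_band127_nonneg byte) _)) (by omega)]
      rw [pvVal, pv_step s hr (pv_band127_nonneg byte)
        (pvVal_nonneg _ (pvGroups_nonneg data (pos + 1))) hs]
  | case4 pos h =>
      intro r s hr hs
      rw [readA_loop, pvGroups]; simp [h, pvVal]

-- pvGroups' final position lies in (pos, len] when the scan starts inside the list
theorem pvGroups_pos_bounds (data : List Int) (pos : Int)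
    (hlo : -(data.length : Int) ≤ pos) (hhi : pos < (data.length : Int)) :
    pos < (pvGroups data pos).2 ∧ (pvGroups data pos).2 ≤ (data.length : Int) := by
  induction pos using pvGroups.induct data with
  | case1 pos h heq =>
      exact absurd heq (by simp [PySem.List.pyGet?_eq_none_iff, PySem.Raise.InRange]; omega)
  | case2 pos h byte heq hstop =>
      rw [pvGroups]; simp only [h, heq, hstop, dif_pos, if_pos]
      constructor
      · omega
      · simpa using h
  | case3 pos h byte heq hstop ih =>
      rw [pvGroups]; simp only [h, heq, hstop, dif_pos, ite_false]
      by_cases h2 : pos + 1 < (data.length : Int)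
      · have := ih (by omega) h2
        exact ⟨by omega, this.2⟩
      · rw [pvGroups]; simp only [h2, dif_neg, not_false_iff]
        exact ⟨by omega, by omega⟩
  | case4 pos h => omega

-- B's phase-1 end position equals A's final pos
theorem findEndB_eq (data : List Int) (pos : Int)
    (hpre : -(data.length : Int) ≤ pos ∨ (data.length : Int) ≤ pos) :
    (if findEndB data pos < (data.length : Int) then findEndB data pos + 1 else findEndB data pos)
      = (pvGroups data pos).2 := by
  induction pos using pvGroups.induct data with
  | case1 pos h heq =>
      exact absurd heq (by simp [PySem.List.pyGet?_eq_none_iff, PySem.Raise.InRange]; omega)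
  | case2 pos h byte heq hstop =>
      rw [findEndB, pvGroups]; simp [h, heq, hstop]
  | case3 pos h byte heq hstop ih =>
      rw [findEndB, pvGroups]
      simp only [h, heq, hstop, dif_pos, ite_false]
      exact ih (Or.inl (by omega))
  | case4 pos h =>
      rw [findEndB, pvGroups]; simp [h]

-- peel the bottom index off B's backward Horner loop
theorem hornerB_peel (data : List Int) : ∀ (i lo acc b : Int),
    lo ≤ i → i < (data.length : Int) → -(data.length : Int) ≤ lo →
    PySem.List.pyGet? data lo = some b →
    hornerB data i lo acc
      = PySem.Int.bor ((hornerB data i (lo + 1) acc) <<< (7:Nat)) (PySem.Int.band b 127) := by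
  intro i lo acc b hle hi hlb hget
  induction hn : (i - lo).toNat generalizing i acc with
  | zero =>
      have : i = lo := by omega
      subst this
      rw [hornerB]
      simp only [hle, dif_pos, hget]
      rw [hornerB]
      simp only [show ¬ i ≤ i - 1 by omega, dif_neg, not_false_iff]
      conv_rhs => rw [hornerB]
      simp [show ¬ i + 1 ≤ i by omega]
  | succ k ih =>
      have hlt : lo < i := by omega
      obtain ⟨bi, hbi⟩ : ∃ bi, PySem.List.pyGet? data i = some bi := by
        rcases h : PySem.List.pyGet? data i with _ | bi
        · exact absurd h (by simp [PySem.List.pyGet?_eq_none_iff, PySem.Raise.InRange]; omega)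
        · exact ⟨bi, rfl⟩
      rw [hornerB]
      conv_rhs => rw [hornerB]
      simp only [show lo ≤ i from hle, show lo + 1 ≤ i by omega, dif_pos, hbi]
      exact ih _ _ (by omega) (by omega) (by omega)

-- B's phase 2 from (pvGroups).2 - 1 down to pos computes the accumulated value
theorem hornerB_eq (data : List Int) (pos : Int)
    (hpre : -(data.length : Int) ≤ pos ∨ (data.length : Int) ≤ pos) :
    ∀ acc : Int, 0 ≤ acc →
    hornerB data ((pvGroups data pos).2 - 1) pos acc
      = PySem.Int.bor (acc <<< (7 * (pvGroups data pos).1.length)) (pvVal (pvGroups data pos).1) := by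
  induction pos using pvGroups.induct data with
  | case1 pos h heq =>
      exact absurd heq (by simp [PySem.List.pyGet?_eq_none_iff, PySem.Raise.InRange]; omega)
  | case2 pos h byte heq hstop =>
      intro acc hacc
      rw [pvGroups]
      simp only [h, heq, hstop, dif_pos, if_pos]
      rw [hornerB]
      simp only [show pos + 1 - 1 = pos from by omega, heq]
      rw [hornerB]
      simp only [show ¬ pos ≤ pos - 1 by omega, dif_neg, not_false_iff]
      simp [pvVal]
  | case3 pos h byte heq hstop ih =>
      intro acc hacc
      have hlo : -(data.length : Int) ≤ pos := by
        rcases hpre with h1 | h1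
        · exact h1
        · omega
      rw [pvGroups]
      simp only [h, heq, hstop, dif_pos, ite_false]
      have hb := pvGroups_pos_bounds data pos hlo h
      rw [pvGroups] at hb
      simp only [h, heq, hstop, dif_pos, ite_false] at hb
      rw [hornerB_peel data ((pvGroups data (pos+1)).2 - 1) pos acc byte
        (by omega) (by omega) hlo heq]
      rw [ih (Or.inl (by omega)) acc hacc]
      -- now pure bit algebra
      have hc := pv_band127_nonneg byte
      have hgs' := pvGroups_nonneg data (pos + 1)
      have hv := pvVal_nonneg _ hgs'
      simp only [List.length_cons, pvVal]
      have hlen : 7 * ((pvGroups data (pos+1)).1.length + 1)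
          = 7 * (pvGroups data (pos+1)).1.length + 7 := by ring
      rw [hlen, Int.shiftLeft_add,
        pv_shl_bor (pv_shl_nonneg hacc _) hv 7,
        pv_bor_assoc (pv_shl_nonneg (pv_shl_nonneg hacc _) _) (pv_shl_nonneg hv _) hc,
        PySem.Int.bor_comm (pvVal (pvGroups data (pos+1)).1 <<< (7:Nat)) (PySem.Int.band byte 127)]
  | case4 pos h =>
      intro acc hacc
      have h2 : pvGroups data pos = ([], pos) := by rw [pvGroups]; simp [h]
      rw [h2, hornerB]
      simp only [show ¬ pos ≤ pos - 1 by omega, dif_neg, not_false_iff, pvVal,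
        List.length_nil, Nat.mul_zero, Int.shiftLeft_zero]
      simp

-- ===== VERDICT (by name: the statement is the Claim_ definition above) =====
theorem read_leb128_spec : Claim_equal_read_leb128 := by
  intro data pos _ hpre
  unfold Spec_read_leb128 read_leb128 read_leb128_alt
  have h0 : ∀ x : Int, PySem.Int.bor 0 x = x := fun x => by
    rw [PySem.Int.bor_comm]; simp
  rw [readA_loop_eq data pos 0 0 le_rfl le_rfl]
  simp only [findEndB_eq data pos hpre]
  rw [hornerB_eq data pos hpre 0 le_rfl]
  simp [h0]
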